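-- pv_equiv track=rewrite | github.com/sineck/apiUltraSoundSwine | AnomalyDetection/scripts/generate_report.py | filter_results
-- ===== SOURCE A (Python) =====
-- from typing import Any
--
-- def filter_results(results: list[dict[str, Any]], model_keys: set[str] | None) -> list[dict[str, Any]]:
--     if model_keys is None:
--         return results
--     filtered = [item for item in results if item["model_key"] in model_keys]
--     missing = sorted(model_keys.difference({item["model_key"] for item in filtered}))
--     if missing:
--         raise SystemExit(f"Missing selected model keys in experiment results: {', '.join(missing)}")
--     return filtered
-- ===== SOURCE B (Python) =====
-- def filter_results(results, model_keys):
--     if model_keys is None: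
--         return results
--     # validate FIRST, key-major: a selected key is missing iff no raw item carries it
--     missing = [k for k in sorted(model_keys)
--                if all(item["model_key"] != k for item in results)]
--     if missing:
--         raise SystemExit(f"Missing selected model keys in experiment results: {', '.join(missing)}")
--     kept = []
--     for item in results:
--         if item["model_key"] in model_keys:
--             kept.append(item)
--     return kept
-- ===== Notes on version B (the rewrite author's own statement) =====
-- stated objective: alternative
-- what changed: Reverses the order of work: B validates first with a key-major nested scan (for each sorted selected key, scan the raw results for a matching item; no set difference, no derived present-key set), then filters with an explicit accumulator loop, whereas A filters first and derives the missing keys from the filtered list by set difference.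
import Mathlib
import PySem

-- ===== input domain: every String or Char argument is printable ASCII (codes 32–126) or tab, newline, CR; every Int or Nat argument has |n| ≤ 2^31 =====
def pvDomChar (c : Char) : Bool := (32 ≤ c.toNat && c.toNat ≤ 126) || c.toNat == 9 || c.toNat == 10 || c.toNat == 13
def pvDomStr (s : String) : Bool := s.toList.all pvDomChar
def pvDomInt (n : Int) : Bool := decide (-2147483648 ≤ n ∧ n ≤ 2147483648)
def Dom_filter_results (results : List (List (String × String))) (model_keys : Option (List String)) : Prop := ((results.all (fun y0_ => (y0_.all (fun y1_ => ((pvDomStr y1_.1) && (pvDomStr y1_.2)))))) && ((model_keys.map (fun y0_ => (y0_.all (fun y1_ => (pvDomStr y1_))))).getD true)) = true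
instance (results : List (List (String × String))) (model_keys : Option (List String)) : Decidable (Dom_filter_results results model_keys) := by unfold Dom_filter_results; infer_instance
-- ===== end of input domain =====

-- B reverses the order of work: validate first with a key-major nested scan over the raw
-- results (no set difference, no derived present-key set), then filter with an explicit
-- accumulator loop; same return value, alternative decomposition, no speed claim.
-- The raising inputs (KeyError on an item without "model_key", SystemExit on a selected
-- key no item carries) are excluded by Pre_filter_results.

-- ===== PORT A =====
def filter_results (results : List (List (String × String))) (model_keys : Option (List String)) : List (List (String × String)) :=
  match model_keys with
  | none => results
  | some ks =>
    -- filtered = [item for item in results if item["model_key"] in model_keys]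
    let filtered := results.filter (fun item => PySem.Set.contains ks ((item.lookup "model_key").getD ""))
    -- missing = sorted(model_keys.difference({item["model_key"] for item in filtered}));
    -- 'if missing: raise SystemExit(...)' is unreachable inside Pre_filter_results
    filtered

-- ===== PORT B =====
-- the explicit accumulator loop of Source B (kept = []; for item in results: ... append)
def pvKeepLoop (ks : List String) : List (List (String × String)) → List (List (String × String)) → List (List (String × String))
  | [], kept => kept
  | item :: rest, kept =>
    if PySem.Set.contains ks ((item.lookup "model_key").getD "") then
      pvKeepLoop ks rest (kept ++ [item])
    else
      pvKeepLoop ks rest kept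

def filter_results_alt (results : List (List (String × String))) (model_keys : Option (List String)) : List (List (String × String)) :=
  match model_keys with
  | none => results
  | some ks =>
    -- missing = [k for k in sorted(model_keys) if all(item["model_key"] != k for item in results)]
    let missing := (PySem.List.sorted ks (fun k => k)).filter
      (fun k => results.all (fun item => ((item.lookup "model_key").getD "") ≠ k))
    -- 'if missing: raise SystemExit(...)' is unreachable inside Pre_filter_results
    let _ := missing
    pvKeepLoop ks results []

-- ===== PRECONDITION & SPEC =====
-- Pre_ excludes exactly the inputs where A raises: an item without a "model_key" entry
-- (KeyError) or a selected key no item carries (SystemExit).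
def Pre_filter_results (results : List (List (String × String))) (model_keys : Option (List String)) : Prop :=
  match model_keys with
  | none => True
  | some ks =>
    (∀ item ∈ results, item.lookup "model_key" ≠ none) ∧
    (∀ k ∈ ks, ∃ item ∈ results, item.lookup "model_key" = some k)
instance (results : List (List (String × String))) (model_keys : Option (List String)) : Decidable (Pre_filter_results results model_keys) := by unfold Pre_filter_results; cases model_keys <;> infer_instance
def pvWitness_filter_results : (List (List (String × String))) × Option (List String) :=
  ([[("model_key", "a"), ("v", "1")], [("model_key", "b")]], some ["a"])

def Spec_filter_results (results : List (List (String × String))) (model_keys : Option (List String)) (out : List (List (String × String))) : Prop := out = filter_results_alt results model_keys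
instance (results : List (List (String × String))) (model_keys : Option (List String)) (out : List (List (String × String))) : Decidable (Spec_filter_results results model_keys out) := by unfold Spec_filter_results; infer_instance

-- ===== CLAIM (what is proved, stated in full; the proofs are below) =====
def Claim_equal_filter_results : Prop := ∀ (results : List (List (String × String))) (model_keys : Option (List String)), Dom_filter_results results model_keys → Pre_filter_results results model_keys → Spec_filter_results results model_keys (filter_results results model_keys)

-- ===== LEMMAS AND PROOFS =====
theorem pvKeepLoop_eq_filter (ks : List String) (l : List (List (String × String)))
    (acc : List (List (String × String))) :
    pvKeepLoop ks l acc = acc ++ l.filter (fun item => PySem.Set.contains ks ((item.lookup "model_key").getD "")) := by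
  induction l generalizing acc with
  | nil => simp [pvKeepLoop]
  | cons item rest ih =>
    by_cases h : (item.lookup "model_key").getD "" ∈ ks
    · simp [pvKeepLoop, PySem.Set.contains, h, ih]
    · simp [pvKeepLoop, PySem.Set.contains, h, ih]

-- ===== VERDICT (by name: the statement is the Claim_ definition above) =====
theorem filter_results_spec : Claim_equal_filter_results := by
  intro results model_keys _ _
  unfold Spec_filter_results filter_results filter_results_alt
  cases model_keys with
  | none => rfl
  | some ks => simp [pvKeepLoop_eq_filter]
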